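-- pv_equiv track=rewrite | github.com/DNAReplicationLab/DNAscentTools | modBAM_tools_additional.py | convert_gap_coordinates_to_normal_coordinates
-- ===== SOURCE A (Python) =====
-- from itertools import count, accumulate, pairwise
--
-- def convert_gap_coordinates_to_normal_coordinates(seq: str, gaps: list[int], base: str = 'T') -> list[int]:
--     """ Convert coordinates from gap notation to standard notation
--
--     Args:
--         seq: reference sequence
--         gaps: each entry a number >= 0 indicating number of bases to skip
--         base: base to be considered for modification, default is "T"
--
--     Returns:
--         list of coordinates in standard notation
--
--     Examples:
--         >>> convert_gap_coordinates_to_normal_coordinates("AGTATGGCT", [0, 0, 0])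
--         [2, 4, 8]
--         >>> convert_gap_coordinates_to_normal_coordinates("AGTATGGCT", [0, 1])
--         [2, 8]
--         >>> convert_gap_coordinates_to_normal_coordinates("AGTATGGCTA", [0, 1], "A")
--         [0, 9]
--         >>> convert_gap_coordinates_to_normal_coordinates("AGTATGGCT", [0, 1], "G")
--         [1, 6]
--         >>> convert_gap_coordinates_to_normal_coordinates("AGTATGGCT", [0, 1], "N")
--         [0, 2]
--     """
--
--     # check that the base is valid
--     if base not in ["A", "G", "C", "T", "N"]:
--         raise ValueError("Bad base!")
--     elif base == "N":
--         candidate_coordinates = list(range(len(seq)))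
--     else:
--         candidate_coordinates = [k for k in range(len(seq)) if seq[k] == base]
--     bases_to_retain = [m - 1 for m in accumulate(k + 1 for k in gaps)]
--
--     return list(map(lambda x: candidate_coordinates[x], bases_to_retain))
-- ===== SOURCE B (Python) =====
-- def convert_gap_coordinates_to_normal_coordinates(seq: str, gaps: list[int], base: str = 'T') -> list[int]:
--     """Streaming rewrite: a single pointer walks seq once; for each gap g it
--     skips g matching bases and emits the index of the next match.  No candidate
--     list and no cumulative-sum list are built."""
--     if base not in ["A", "G", "C", "T", "N"]:
--         raise ValueError("Bad base!")
--     out = []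
--     i = 0
--     n = len(seq)
--     for g in gaps:
--         remaining = g
--         while True:
--             if i >= n:
--                 raise IndexError("list index out of range")
--             if base == "N" or seq[i] == base:
--                 if remaining == 0:
--                     out.append(i)
--                     i += 1
--                     break
--                 remaining -= 1
--             i += 1
--     return out
-- ===== Notes on version B (the rewrite author's own statement) =====
-- stated objective: alternative
-- what changed: Replaces the materialised candidate-coordinate list plus itertools.accumulate index list with a single streaming pointer that walks the sequence once, skipping g matches per gap and emitting the next match's index.
-- outside the precondition, e.g. on convert_gap_coordinates_to_normal_coordinates('AGT', [-1], 'T'): A returns [2], B raises IndexError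
import Mathlib
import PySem

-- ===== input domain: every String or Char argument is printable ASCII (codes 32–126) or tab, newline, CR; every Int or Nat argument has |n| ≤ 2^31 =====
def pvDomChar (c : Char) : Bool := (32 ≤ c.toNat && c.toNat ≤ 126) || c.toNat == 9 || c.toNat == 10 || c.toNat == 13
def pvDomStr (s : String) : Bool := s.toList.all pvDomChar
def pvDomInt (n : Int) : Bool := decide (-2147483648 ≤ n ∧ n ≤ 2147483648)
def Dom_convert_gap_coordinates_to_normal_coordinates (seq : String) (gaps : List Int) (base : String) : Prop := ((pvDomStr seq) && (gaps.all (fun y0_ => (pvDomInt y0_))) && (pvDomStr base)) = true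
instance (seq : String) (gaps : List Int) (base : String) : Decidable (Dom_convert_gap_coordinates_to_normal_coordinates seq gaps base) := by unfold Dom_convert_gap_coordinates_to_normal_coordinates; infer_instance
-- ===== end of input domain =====

-- B replaces A's materialised candidate list + accumulate index list by one streaming
-- pointer over the sequence (a different decomposition, similar cost).

-- ===== PORT A =====
-- hand port of itertools.accumulate (running sums, with running total s); exact
def pyAccum : List Int → Int → List Int
  | [], _ => []
  | x :: xs, s => (s + x) :: pyAccum xs (s + x)

def convert_gap_coordinates_to_normal_coordinates (seq : String) (gaps : List Int) (base : String) : List Int :=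
  if base ∈ (["A", "G", "C", "T", "N"] : List String) then
    let cand : List Int :=
      if base == "N" then List.map (fun (k : Nat) => (k : Int)) (List.range seq.toList.length)
      else List.map (fun (k : Nat) => (k : Int))
            ((List.range seq.toList.length).filter
              (fun k => (seq.toList[k]?.map (fun c => String.ofList [c])) == some base))
    let bases_to_retain : List Int := (pyAccum (gaps.map (fun k => k + 1)) 0).map (fun m => m - 1)
    -- cand[x]: in range under Pre_ (out of range = IndexError, excluded)
    bases_to_retain.map (fun x => PySem.List.pyGetD cand x 0)
  else []  -- ValueError "Bad base!", excluded by Pre_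

-- ===== PORT B =====
-- inner while loop: advance through the chars (suffix cs, absolute position i) past g
-- matches, return (emitted index, remaining suffix, next position); none = IndexError
def altStep (base : String) : List Char → Nat → Int → Option (Int × List Char × Nat)
  | [], _, _ => none
  | c :: rest, i, g =>
    if base == "N" || String.ofList [c] == base then
      if g == 0 then some ((i : Int), rest, i + 1)
      else altStep base rest (i + 1) (g - 1)
    else altStep base rest (i + 1) g

-- outer for loop over gaps, threading the pointer
def altMain (base : String) : List Int → List Char → Nat → Option (List Int)
  | [], _, _ => some []
  | g :: gs, cs, i =>
    match altStep base cs i g with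
    | none => none
    | some (idx, rest, i') => (altMain base gs rest i').map (fun l => idx :: l)

def convert_gap_coordinates_to_normal_coordinates_alt (seq : String) (gaps : List Int) (base : String) : List Int :=
  if base ∈ (["A", "G", "C", "T", "N"] : List String) then
    (altMain base gaps seq.toList 0).getD []  -- none = IndexError, excluded by Pre_
  else []  -- ValueError, excluded by Pre_

-- ===== PRECONDITION & SPEC =====
-- number of positions of seq a valid base can address
def pvMatchCount (base : String) (cs : List Char) : Nat :=
  if base = "N" then cs.length else (cs.filter (fun c => String.ofList [c] == base)).length

-- Pre_ excludes: invalid base (A raises ValueError); any negative gap (with negative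
-- gaps A indexes the candidate list with negative cumulative offsets — Python
-- wraparound — while B's streaming pointer runs off the end and raises IndexError);
-- and gap totals exceeding the number of matching bases (A and B raise IndexError).
def Pre_convert_gap_coordinates_to_normal_coordinates (seq : String) (gaps : List Int) (base : String) : Prop :=
  base ∈ (["A", "G", "C", "T", "N"] : List String) ∧ (∀ g ∈ gaps, 0 ≤ g) ∧
    (gaps.map (fun k => k + 1)).sum ≤ (pvMatchCount base seq.toList : Int)

instance (seq : String) (gaps : List Int) (base : String) : Decidable (Pre_convert_gap_coordinates_to_normal_coordinates seq gaps base) := by unfold Pre_convert_gap_coordinates_to_normal_coordinates; infer_instance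

def pvWitness_convert_gap_coordinates_to_normal_coordinates : String × List Int × String :=
  ("AGTATGGCT", [0, 0, 0], "T")

def Spec_convert_gap_coordinates_to_normal_coordinates (seq : String) (gaps : List Int) (base : String) (out : List Int) : Prop := out = convert_gap_coordinates_to_normal_coordinates_alt seq gaps base
instance (seq : String) (gaps : List Int) (base : String) (out : List Int) : Decidable (Spec_convert_gap_coordinates_to_normal_coordinates seq gaps base out) := by unfold Spec_convert_gap_coordinates_to_normal_coordinates; infer_instance

-- ===== CLAIM (what is proved, stated in full; the proofs are below) =====
def Claim_equal_convert_gap_coordinates_to_normal_coordinates : Prop := ∀ (seq : String) (gaps : List Int) (base : String), Dom_convert_gap_coordinates_to_normal_coordinates seq gaps base → Pre_convert_gap_coordinates_to_normal_coordinates seq gaps base → Spec_convert_gap_coordinates_to_normal_coordinates seq gaps base (convert_gap_coordinates_to_normal_coordinates seq gaps base)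

-- ===== LEMMAS AND PROOFS =====

-- positions (as Int, offset by i) of chars of cs satisfying p
def pvPos (p : Char → Bool) : List Char → Nat → List Int
  | [], _ => []
  | c :: rest, i => if p c then (i : Int) :: pvPos p rest (i + 1) else pvPos p rest (i + 1)

theorem pvPos_length (p : Char → Bool) (cs : List Char) (i : Nat) :
    (pvPos p cs i).length = (cs.filter p).length := by
  induction cs generalizing i with
  | nil => rfl
  | cons c rest ih =>
    simp only [pvPos, List.filter]
    cases hp : p c <;> simp [ih]

theorem pvPos_true (p : Char → Bool) (hp : ∀ c, p c = true) (cs : List Char) (i : Nat) :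
    pvPos p cs i = (List.range cs.length).map (fun k => ((i + k : Nat) : Int)) := by
  induction cs generalizing i with
  | nil => rfl
  | cons c rest ih =>
    simp only [pvPos, hp c, if_true, List.length_cons, List.range_succ_eq_map, List.map_cons,
      List.map_map]
    refine List.cons_eq_cons.mpr ⟨by simp, ?_⟩
    rw [ih (i + 1)]
    apply List.map_congr_left
    intro k _
    simp only [Function.comp]
    push_cast
    ring

theorem pvPos_filter_range (p : Char → Bool) (cs : List Char) (i : Nat) :
    ((List.range cs.length).filter (fun k => (cs[k]?.elim false p))).map
        (fun k => ((i + k : Nat) : Int)) = pvPos p cs i := by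
  induction cs generalizing i with
  | nil => rfl
  | cons c rest ih =>
    simp only [List.length_cons, List.range_succ_eq_map, List.filter_cons, pvPos]
    cases hp : p c
    · simp only [List.getElem?_cons_zero, Option.elim_some, hp, if_neg Bool.false_ne_true,
        List.filter_map, List.map_map]
      rw [← ih (i + 1)]
      apply List.map_congr_left
      intro k _
      simp only [Function.comp]
      congr 1
      omega
    · simp only [List.getElem?_cons_zero, Option.elim_some, hp, List.filter_map, if_pos]
      simp only [List.map_cons]
      refine List.cons_eq_cons.mpr ⟨by simp, ?_⟩
      rw [List.map_map]
      have hq : ((fun k => (c :: rest)[k]?.elim false p) ∘ Nat.succ) =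
          (fun k => rest[k]?.elim false p) := by
        funext k; simp
      rw [hq, ← ih (i + 1)]
      apply List.map_congr_left
      intro k _
      simp only [Function.comp]
      push_cast
      ring

-- generalized-start accumulate is a shift of the start-0 one
theorem pyAccum_shift (xs : List Int) (s t : Int) :
    pyAccum xs (s + t) = (pyAccum xs t).map (fun m => m + s) := by
  induction xs generalizing t with
  | nil => rfl
  | cons x xs ih =>
    simp only [pyAccum, List.map_cons]
    congr 1
    · ring
    · rw [show s + t + x = s + (t + x) by ring, ih (t + x)]

theorem pyAccum_lb (xs : List Int) (s : Int) (h : ∀ x ∈ xs, 1 ≤ x) :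
    ∀ y ∈ pyAccum xs s, s + 1 ≤ y := by
  induction xs generalizing s with
  | nil => intro y hy; simp [pyAccum] at hy
  | cons x xs ih =>
    intro y hy
    simp only [pyAccum, List.mem_cons] at hy
    rcases hy with rfl | hy
    · have := h x (by simp); omega
    · have := ih (s + x) (fun z hz => h z (by simp [hz])) y hy
      have := h x (by simp)
      omega

theorem pyGetD_drop (L : List Int) (k : Nat) (j : Int) (hj : 0 ≤ j) :
    PySem.List.pyGetD L ((k : Int) + j) 0 = PySem.List.pyGetD (L.drop k) j 0 := by
  have h1 : ((k : Int) + j) = ((k + j.toNat : Nat) : Int) := by omega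
  rw [h1, PySem.List.pyGetD_natCast, PySem.List.pyGetD_of_nonneg _ _ hj]
  simp [List.getD, List.getElem?_drop]

theorem altStep_spec (base : String) (cs : List Char) (i : Nat) (g : Int)
    (hg : 0 ≤ g)
    (hlt : g < ((pvPos (fun c => base == "N" || String.ofList [c] == base) cs i).length : Int)) :
    ∃ rest i',
      altStep base cs i g =
        some (PySem.List.pyGetD (pvPos (fun c => base == "N" || String.ofList [c] == base) cs i) g 0,
          rest, i') ∧
      pvPos (fun c => base == "N" || String.ofList [c] == base) rest i' =
        (pvPos (fun c => base == "N" || String.ofList [c] == base) cs i).drop (g.toNat + 1) := by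
  induction cs generalizing i g with
  | nil => simp [pvPos] at hlt; omega
  | cons c rest ih =>
    by_cases hp : (base == "N" || String.ofList [c] == base) = true
    · rw [show pvPos (fun c => base == "N" || String.ofList [c] == base) (c :: rest) i =
          (i : Int) :: pvPos (fun c => base == "N" || String.ofList [c] == base) rest (i + 1) from by
        simp [pvPos, hp]] at *
      by_cases hg0 : g = 0
      · subst hg0
        refine ⟨rest, i + 1, ?_, ?_⟩
        · simp [altStep, hp, PySem.List.pyGetD_zero_cons]
        · simp
      · have hg1 : 1 ≤ g := by omega
        have hlt' : g - 1 <
            ((pvPos (fun c => base == "N" || String.ofList [c] == base) rest (i + 1)).length : Int) := by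
          simp only [List.length_cons] at hlt; push_cast at hlt ⊢; omega
        obtain ⟨rest', i', heq, hpos⟩ := ih (i + 1) (g - 1) (by omega) hlt'
        refine ⟨rest', i', ?_, ?_⟩
        · rw [show altStep base (c :: rest) i g = altStep base rest (i + 1) (g - 1) from by
            simp [altStep, hp, hg0], heq]
          congr 2
          have h2 : g = ((1 : Nat) : Int) + (g - 1) := by omega
          rw [h2, pyGetD_drop _ 1 (g - 1) (by omega)]
          simp
        · rw [hpos]
          have h3 : g.toNat + 1 = ((g - 1).toNat + 1) + 1 := by omega
          rw [h3]
          simp [List.drop]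
    · rw [show pvPos (fun c => base == "N" || String.ofList [c] == base) (c :: rest) i =
          pvPos (fun c => base == "N" || String.ofList [c] == base) rest (i + 1) from by
        simp [pvPos, hp]] at *
      obtain ⟨rest', i', heq, hpos⟩ := ih (i + 1) g hg hlt
      exact ⟨rest', i', by rw [← heq]; simp [altStep, hp], hpos⟩

theorem altMain_spec (base : String) (gs : List Int) (cs : List Char) (i : Nat)
    (hnn : ∀ g ∈ gs, 0 ≤ g)
    (hsum : (gs.map (fun k => k + 1)).sum ≤
      ((pvPos (fun c => base == "N" || String.ofList [c] == base) cs i).length : Int)) :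
    altMain base gs cs i =
      some (((pyAccum (gs.map (fun k => k + 1)) 0).map (fun m => m - 1)).map
        (fun x => PySem.List.pyGetD (pvPos (fun c => base == "N" || String.ofList [c] == base) cs i) x 0)) := by
  induction gs generalizing cs i with
  | nil => simp [altMain, pyAccum]
  | cons g gs ih =>
    have hg : 0 ≤ g := hnn g (by simp)
    have htail_nn : ∀ x ∈ gs.map (fun k => k + 1), (1 : Int) ≤ x := by
      intro x hx
      obtain ⟨k, hk, rfl⟩ := List.mem_map.mp hx
      have := hnn k (by simp [hk]); omega
    have htail_sum_nonneg : 0 ≤ (gs.map (fun k => k + 1)).sum :=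
      List.sum_nonneg (fun x hx => by have := htail_nn x hx; omega)
    have hsum' : (g + 1) + (gs.map (fun k => k + 1)).sum ≤
        ((pvPos (fun c => base == "N" || String.ofList [c] == base) cs i).length : Int) := by
      simpa using hsum
    have hlt : g < ((pvPos (fun c => base == "N" || String.ofList [c] == base) cs i).length : Int) := by
      omega
    obtain ⟨rest, i', heq, hpos⟩ := altStep_spec base cs i g hg hlt
    have hdroplen : (((pvPos (fun c => base == "N" || String.ofList [c] == base) cs i).drop
        (g.toNat + 1)).length : Int) =
        ((pvPos (fun c => base == "N" || String.ofList [c] == base) cs i).length : Int)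
          - (g.toNat + 1) := by
      simp [List.length_drop]
      omega
    have ihres := ih rest i' (fun x hx => hnn x (by simp [hx])) (by
      rw [hpos, hdroplen]; omega)
    simp only [altMain, heq, ihres, Option.map_some]
    congr 1
    simp only [List.map_cons, pyAccum, List.map_map]
    congr 1
    · norm_num
    · have hshift : pyAccum (gs.map (fun k => k + 1)) (0 + (g + 1)) =
        (pyAccum (gs.map (fun k => k + 1)) 0).map (fun m => m + (g + 1)) := by
        rw [show (0 : Int) + (g + 1) = (g + 1) + 0 by ring, pyAccum_shift]
      rw [hshift, List.map_map]
      apply List.map_congr_left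
      intro y hy
      have hy1 : (1 : Int) ≤ y := by
        have := pyAccum_lb (gs.map (fun k => k + 1)) 0 htail_nn y hy; omega
      simp only [Function.comp]
      rw [hpos]
      have harg : y + (g + 1) - 1 = ((g.toNat + 1 : Nat) : Int) + (y - 1) := by omega
      rw [harg, pyGetD_drop _ (g.toNat + 1) (y - 1) (by omega)]

-- A's candidate list is exactly pvPos of the streaming predicate
theorem cand_eq_pos (seq : String) (base : String)
    (hb : base ∈ (["A", "G", "C", "T", "N"] : List String)) :
    (if base == "N" then List.map (fun (k : Nat) => (k : Int)) (List.range seq.toList.length)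
     else List.map (fun (k : Nat) => (k : Int))
           ((List.range seq.toList.length).filter
             (fun k => (seq.toList[k]?.map (fun c => String.ofList [c])) == some base))) =
    pvPos (fun c => base == "N" || String.ofList [c] == base) seq.toList 0 := by
  by_cases hN : base = "N"
  · subst hN
    rw [if_pos (by decide), pvPos_true _ (fun c => by simp)]
    apply List.map_congr_left
    intro k _
    norm_num
  · have hbn : (base == "N") = false := by
      simp [hN]
    rw [if_neg (by simp [hN])]
    rw [← pvPos_filter_range (fun c => base == "N" || String.ofList [c] == base) seq.toList 0]
    have hfq : (List.range seq.toList.length).filter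
          (fun k => (seq.toList[k]?.map (fun c => String.ofList [c])) == some base) =
        (List.range seq.toList.length).filter
          (fun k => (seq.toList[k]?.elim false
            (fun c => base == "N" || String.ofList [c] == base))) := by
      apply List.filter_congr
      intro k _
      cases h : seq.toList[k]? with
      | none => simp
      | some c => simp [hbn]
    rw [hfq]
    apply List.map_congr_left
    intro k _
    norm_num

theorem count_eq_pos_length (seq : String) (base : String) :
    (pvMatchCount base seq.toList : Int) =
      ((pvPos (fun c => base == "N" || String.ofList [c] == base) seq.toList 0).length : Int) := by
  rw [pvPos_length]
  unfold pvMatchCount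
  by_cases hN : base = "N"
  · subst hN
    rw [if_pos rfl, List.filter_eq_self.mpr (fun c _ => by simp)]
  · rw [if_neg hN]
    have hbn : (base == "N") = false := by simp [hN]
    have hflt : (seq.toList.filter (fun c => String.ofList [c] == base)) =
        seq.toList.filter (fun c => base == "N" || String.ofList [c] == base) := by
      apply List.filter_congr
      intro c _
      rw [hbn, Bool.false_or]
    rw [hflt]

-- ===== VERDICT (by name: the statement is the Claim_ definition above) =====
theorem convert_gap_coordinates_to_normal_coordinates_spec : Claim_equal_convert_gap_coordinates_to_normal_coordinates := by
  intro seq gaps base _ hpre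
  obtain ⟨hb, hnn, hsum⟩ := hpre
  unfold Spec_convert_gap_coordinates_to_normal_coordinates
  unfold convert_gap_coordinates_to_normal_coordinates
  unfold convert_gap_coordinates_to_normal_coordinates_alt
  rw [if_pos hb, if_pos hb]
  rw [count_eq_pos_length seq base] at hsum
  rw [altMain_spec base gaps seq.toList 0 hnn hsum]
  rw [cand_eq_pos seq base hb]
  simp
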